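-- pv_equiv track=rewrite | github.com/Shibani987/ghostfix-ai | core/parser.py | _trim_frontend_block
-- ===== SOURCE A (Python) =====
-- def _trim_frontend_block(block: str) -> str:
--     lines = block.strip().splitlines()
--     trimmed = []
--     for line in lines:
--         stripped = line.strip()
--         if trimmed and stripped.startswith(("ready -", "event -", "wait -", "info  -", "Local:", "npm ERR!")):
--             break
--         trimmed.append(line)
--         if len(trimmed) >= 24:
--             break
--     return "\n".join(trimmed).strip()
-- ===== SOURCE B (Python) =====
-- _MARKERS = ("ready -", "event -", "wait -", "info  -", "Local:", "npm ERR!")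
--
-- def _trim_frontend_block(block: str) -> str:
--     def keep(lines, budget, first):
--         if not lines or budget == 0:
--             return []
--         line = lines[0]
--         if not first and line.strip().startswith(_MARKERS):
--             return []
--         return [line] + keep(lines[1:], budget - 1, False)
--
--     return "\n".join(keep(block.strip().splitlines(), 24, True)).strip()
-- ===== Notes on version B (the rewrite author's own statement) =====
-- stated objective: alternative
-- what changed: Replaces A's iterative accumulate-and-break loop (growing list, length check after each append) with a structural recursion over head/tail carrying an explicit remaining budget and a first-line flag, building the kept lines front-to-back by cons.
import Mathlib
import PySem

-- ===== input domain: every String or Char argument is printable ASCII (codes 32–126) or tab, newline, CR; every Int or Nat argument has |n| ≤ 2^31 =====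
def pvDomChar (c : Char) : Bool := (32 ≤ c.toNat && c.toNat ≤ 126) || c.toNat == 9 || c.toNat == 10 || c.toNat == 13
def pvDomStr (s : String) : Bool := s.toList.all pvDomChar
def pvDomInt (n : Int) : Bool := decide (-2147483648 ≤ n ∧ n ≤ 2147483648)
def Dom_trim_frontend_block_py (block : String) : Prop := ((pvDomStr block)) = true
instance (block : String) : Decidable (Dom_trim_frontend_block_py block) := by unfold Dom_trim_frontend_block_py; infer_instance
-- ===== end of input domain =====

-- B replaces A's iterative accumulate-and-break loop by a budgeted structural recursion
-- building the kept lines by cons; objective: alternative decomposition, same cost.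

-- marker prefixes tested by Python's stripped.startswith((...)) tuple (shared constant of both programs)
def pvMarkers : List String := ["ready -", "event -", "wait -", "info  -", "Local:", "npm ERR!"]
def pvHasMarker (s : String) : Bool := pvMarkers.any (fun p => PySem.Str.startswith s p)

-- ===== PORT A =====
-- the for-loop with its growing `trimmed` accumulator and two break conditions
def pvTrimLoopA : List String → List String → List String
  | trimmed, [] => trimmed
  | trimmed, line :: rest =>
    let stripped := PySem.Str.strip line
    if trimmed ≠ [] ∧ pvHasMarker stripped then trimmed
    else
      let trimmed' := trimmed ++ [line]
      if 24 ≤ trimmed'.length then trimmed'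
      else pvTrimLoopA trimmed' rest

def trim_frontend_block_py (block : String) : String :=
  let lines := PySem.Str.splitlines (PySem.Str.strip block)
  PySem.Str.strip (PySem.Str.join "\n" (pvTrimLoopA [] lines))

-- ===== PORT B =====
-- def keep(lines, budget, first): recursion on head/tail with a remaining budget and first-line flag
def pvKeepB : List String → Nat → Bool → List String
  | [], _, _ => []
  | _, 0, _ => []
  | line :: rest, b + 1, first =>
    if first = false ∧ pvHasMarker (PySem.Str.strip line) then []
    else line :: pvKeepB rest b false

def trim_frontend_block_py_alt (block : String) : String :=
  PySem.Str.strip (PySem.Str.join "\n"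
    (pvKeepB (PySem.Str.splitlines (PySem.Str.strip block)) 24 true))

-- ===== PRECONDITION & SPEC =====
def Spec_trim_frontend_block_py (block : String) (out : String) : Prop := out = trim_frontend_block_py_alt block
instance (block : String) (out : String) : Decidable (Spec_trim_frontend_block_py block out) := by unfold Spec_trim_frontend_block_py; infer_instance

-- ===== CLAIM =====
def Claim_equal_trim_frontend_block_py : Prop := ∀ (block : String), Dom_trim_frontend_block_py block → Spec_trim_frontend_block_py block (trim_frontend_block_py block)

-- ===== LEMMAS AND PROOFS =====

lemma pvLoopA_eq_keepB (rest : List String) : ∀ (acc : List String), acc ≠ [] → acc.length < 24 →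
    pvTrimLoopA acc rest = acc ++ pvKeepB rest (24 - acc.length) false := by
  induction rest with
  | nil =>
    intro acc h1 h2
    have : 24 - acc.length = (24 - acc.length - 1) + 1 := by omega
    simp [pvTrimLoopA, pvKeepB]
  | cons l rs ih =>
    intro acc h1 h2
    have hb : 24 - acc.length = (23 - acc.length) + 1 := by omega
    by_cases hm : pvHasMarker (PySem.Str.strip l)
    · simp [pvTrimLoopA, h1, hm, hb, pvKeepB]
    · by_cases h24 : 24 ≤ acc.length + 1
      · have h23 : acc.length = 23 := by omega
        have h0 : pvKeepB rs 0 false = [] := by cases rs <;> simp [pvKeepB]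
        simp [pvTrimLoopA, hm, h23, pvKeepB, h0]
      · have hrec := ih (acc ++ [l]) (by simp) (by simp; omega)
        rw [show pvTrimLoopA acc (l :: rs) = pvTrimLoopA (acc ++ [l]) rs from by
          simp [pvTrimLoopA, hm, h24]]
        have hlen : 24 - (acc ++ [l]).length = 23 - acc.length := by
          simp only [List.length_append, List.length_singleton]; omega
        rw [hrec, hlen, hb]
        simp [pvKeepB, hm]

lemma pvLoop_eq_keep (lines : List String) :
    pvTrimLoopA [] lines = pvKeepB lines 24 true := by
  cases lines with
  | nil => simp [pvTrimLoopA, pvKeepB]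
  | cons l rs =>
    have hA : pvTrimLoopA [] (l :: rs) = pvTrimLoopA [l] rs := by
      simp [pvTrimLoopA]
    rw [hA, pvLoopA_eq_keepB rs [l] (by simp) (by simp)]
    simp [pvKeepB]

-- ===== VERDICT =====
theorem trim_frontend_block_py_spec : Claim_equal_trim_frontend_block_py := by
  intro block _
  show PySem.Str.strip (PySem.Str.join "\n"
      (pvTrimLoopA [] (PySem.Str.splitlines (PySem.Str.strip block)))) = _
  rw [pvLoop_eq_keep]
  rfl
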